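-- pv_equiv track=rewrite | github.com/quasiblob/ComfyUI-EsesImageOffset | image_offset.py | _parse_color_string
-- ===== SOURCE A (Python) =====
-- def _parse_color_string(color_string):
--     color_string = color_string.strip()
--     if not color_string: return (0, 0, 0, 0)
--     try:
--         if len(color_string) == 6: return tuple(int(color_string[i:i+2], 16) for i in (0, 2, 4)) + (255,)
--         if len(color_string) == 8: return tuple(int(color_string[i:i+2], 16) for i in (0, 2, 4, 6))
--     except ValueError: pass
--     try:
--         parts = [int(p.strip()) for p in color_string.split(',')]
--         if len(parts) == 3: return tuple(parts) + (255,) # Default to opaque if only RGB is provided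
--         if len(parts) == 4: return tuple(parts)
--     except ValueError: pass
--
--     return (0, 0, 0, 0)
-- ===== SOURCE B (Python) =====
-- def _parse_color_string(color_string):
--     s = color_string.strip()
--     # Format detection: comma-separated decimal fields, or (any even length)
--     # 2-char hex chunks; the component-count filter below does the rest.
--     if ',' in s:
--         fields = [p.strip() for p in s.split(',')]
--         parse = int
--     elif len(s) % 2 == 0:
--         fields = [s[i:i + 2] for i in range(0, len(s), 2)]
--         parse = lambda t: int(t, 16)
--     else:
--         fields = []
--         parse = int
--     vals = []
--     for f in fields:
--         try:
--             vals.append(parse(f))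
--         except ValueError:
--             vals = []
--             break
--     if len(vals) not in (3, 4):
--         return (0, 0, 0, 0)
--     r, g, b, a = (vals + [255])[:4]
--     return (r, g, b, a)
-- ===== Notes on version B (the rewrite author's own statement) =====
-- stated objective: simpler
-- what changed: B replaces A's two independent try/except parse cascades (hex-by-length with silent fall-through to comma parsing) with format detection that yields a field list plus a parser, one generic parse loop, a single component-count filter (3 or 4) and a pad-and-slice completion (vals+[255])[:4] - it has no empty-string special case and never tests for length 6 or 8.
import Mathlib
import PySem

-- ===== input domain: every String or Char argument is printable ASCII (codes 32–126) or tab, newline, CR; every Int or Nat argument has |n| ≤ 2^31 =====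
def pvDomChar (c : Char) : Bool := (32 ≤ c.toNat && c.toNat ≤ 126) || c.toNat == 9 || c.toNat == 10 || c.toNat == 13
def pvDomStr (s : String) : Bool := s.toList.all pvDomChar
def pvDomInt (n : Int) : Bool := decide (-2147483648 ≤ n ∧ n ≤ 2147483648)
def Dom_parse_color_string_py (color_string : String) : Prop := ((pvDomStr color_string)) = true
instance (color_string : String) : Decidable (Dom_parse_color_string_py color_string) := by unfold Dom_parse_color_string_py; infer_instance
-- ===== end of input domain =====

-- B replaces A's two try/except parse cascades (hex-by-length falling through to a
-- comma parse) with format detection yielding fields+parser, one generic parse loop,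
-- a single component-count filter and a pad-and-slice completion (objective: simpler).

-- ===== PORT A =====
-- A: strip; empty → default; try hex byte pairs when len is 6/8 (ValueError falls
-- through = the `none` branch of hexRes); then try the comma-split int list; default.
def parse_color_string_py (color_string : String) : Int × Int × Int × Int :=
  let cs : List Char := PySem.Chars.strip color_string.toList   -- color_string.strip()
  if cs = [] then (0, 0, 0, 0)
  else
    let hexRes : Option (Int × Int × Int × Int) :=
      if cs.length = 6 then
        match PySem.Int.ofCharsBase? (PySem.List.slice cs (some 0) (some 2)) 16,
              PySem.Int.ofCharsBase? (PySem.List.slice cs (some 2) (some 4)) 16,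
              PySem.Int.ofCharsBase? (PySem.List.slice cs (some 4) (some 6)) 16 with
        | some r, some g, some b => some (r, g, b, 255)
        | _, _, _ => none                                       -- ValueError: fall through
      else if cs.length = 8 then
        match PySem.Int.ofCharsBase? (PySem.List.slice cs (some 0) (some 2)) 16,
              PySem.Int.ofCharsBase? (PySem.List.slice cs (some 2) (some 4)) 16,
              PySem.Int.ofCharsBase? (PySem.List.slice cs (some 4) (some 6)) 16,
              PySem.Int.ofCharsBase? (PySem.List.slice cs (some 6) (some 8)) 16 with
        | some r, some g, some b, some a => some (r, g, b, a)
        | _, _, _, _ => none                                    -- ValueError: fall through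
      else none
    match hexRes with
    | some t => t
    | none =>
      -- parts = [int(p.strip()) for p in color_string.split(',')]; ValueError → default
      match (PySem.Chars.splitOn cs [',']).map
              (fun p => PySem.Int.ofChars? (PySem.Chars.strip p)) with
      | [some r, some g, some b] => (r, g, b, 255)
      | [some r, some g, some b, some a] => (r, g, b, a)
      | _ => (0, 0, 0, 0)

-- ===== PORT B =====
-- B: strip; detect the format (comma → decimal fields, even length → 2-char hex
-- chunks, else no fields); one generic parse loop (break resets vals = the `none`
-- result); component-count filter 3/4; pad-and-slice completion (vals+[255])[:4].

-- the `for f in fields: try vals.append(parse(f)) except ValueError: vals=[]; break`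
-- loop: `none` = the loop broke (vals = [])
def pvCollectGo (parse : List Char → Option Int) : List (List Char) → Option (List Int)
  | [] => some []
  | f :: rest =>
    -- ValueError (`none`) = `vals = []; break`
    (parse f).bind (fun v => (pvCollectGo parse rest).map (fun vs => v :: vs))

-- the shared tail of B after the loop: count filter, then r,g,b,a = (vals+[255])[:4]
def pvFinish (parse : List Char → Option Int) (fields : List (List Char)) :
    Int × Int × Int × Int :=
  let vals : List Int := (pvCollectGo parse fields).getD []
  if vals.length = 3 ∨ vals.length = 4 then
    -- r, g, b, a = (vals + [255])[:4]  (the unpacking cannot fail after the filter)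
    let t := PySem.List.slice (vals ++ [255]) none (some 4)
    (PySem.List.pyGetD t 0 0, PySem.List.pyGetD t 1 0,
     PySem.List.pyGetD t 2 0, PySem.List.pyGetD t 3 0)
  else (0, 0, 0, 0)

def parse_color_string_py_alt (color_string : String) : Int × Int × Int × Int :=
  let cs : List Char := PySem.Chars.strip color_string.toList   -- color_string.strip()
  if ',' ∈ cs then
    pvFinish (fun t => PySem.Int.ofChars? t)
      ((PySem.Chars.splitOn cs [',']).map (fun p => PySem.Chars.strip p))
  else if PySem.Int.mod (PySem.List.len cs) 2 = 0 then
    pvFinish (fun t => PySem.Int.ofCharsBase? t 16)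
      ((PySem.List.pyRange 0 (PySem.List.len cs) 2).map
        (fun i => PySem.List.slice cs (some i) (some (i + 2))))
  else
    pvFinish (fun t => PySem.Int.ofChars? t) []

-- ===== PRECONDITION & SPEC =====
def Spec_parse_color_string_py (color_string : String) (out : Int × Int × Int × Int) : Prop := out = parse_color_string_py_alt color_string
instance (color_string : String) (out : Int × Int × Int × Int) : Decidable (Spec_parse_color_string_py color_string out) := by unfold Spec_parse_color_string_py; infer_instance

-- ===== CLAIM (what is proved, stated in full; the proofs are below) =====
def Claim_equal_parse_color_string_py : Prop := ∀ (color_string : String), Dom_parse_color_string_py color_string → Spec_parse_color_string_py color_string (parse_color_string_py color_string)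

-- ===== LEMMAS AND PROOFS =====

-- int(t, 16) fails on any 2-character string containing a comma (ASCII range).
theorem pvHexNoneRight (n : Nat) (h : n < 128) :
    PySem.Int.ofCharsBase? [Char.ofNat n, ','] 16 = none := by
  revert n; decide

theorem pvHexNoneLeft (n : Nat) (h : n < 128) :
    PySem.Int.ofCharsBase? [',', Char.ofNat n] 16 = none := by
  revert n; decide

theorem pvHexNoneRight' (c : Char) (h : c.toNat < 128) :
    PySem.Int.ofCharsBase? [c, ','] 16 = none := by
  have := pvHexNoneRight c.toNat h
  rwa [Char.ofNat_toNat] at this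

theorem pvHexNoneLeft' (c : Char) (h : c.toNat < 128) :
    PySem.Int.ofCharsBase? [',', c] 16 = none := by
  have := pvHexNoneLeft c.toNat h
  rwa [Char.ofNat_toNat] at this

-- strip only removes characters
theorem pvStrip_sublist (l : List Char) : (PySem.Chars.strip l).Sublist l := by
  unfold PySem.Chars.strip PySem.Chars.lstrip PySem.Chars.rstrip
  have h1 : (List.dropWhile PySem.Chars.isspace (List.dropWhile PySem.Chars.isspace l).reverse).Sublist
      (List.dropWhile PySem.Chars.isspace l).reverse := List.dropWhile_sublist _
  have h2 := h1.reverse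
  simp at h2
  exact h2.trans (List.dropWhile_sublist _)

-- splitting a comma-free list on ',' yields exactly one piece
theorem pvGoNoSep (fuel : Nat) : ∀ (l cur : List Char) (acc : List (List Char)),
    ',' ∉ l → (PySem.Chars.splitOn.go [','] fuel l cur acc).length = acc.length + 1 := by
  induction fuel with
  | zero =>
    intro l cur acc _
    simp [PySem.Chars.splitOn.go]
  | succ fuel ih =>
    intro l cur acc hl
    cases l with
    | nil => simp [PySem.Chars.splitOn.go]
    | cons c rest =>
      have hpre : List.isPrefixOf [','] (c :: rest) = false := by
        simp [List.isPrefixOf]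
        intro hc; exact hl (List.mem_cons.mpr (Or.inl hc))
      rw [PySem.Chars.splitOn.go]
      simp only [hpre]
      simp only [Bool.false_eq_true, if_false]
      exact ih rest (c :: cur) acc (fun h => hl (List.mem_cons_of_mem _ h))

theorem pvSplitOn_no_comma (cs : List Char) (h : ',' ∉ cs) :
    ∃ w, PySem.Chars.splitOn cs [','] = [w] := by
  have hlen : (PySem.Chars.splitOn cs [',']).length = 1 := by
    unfold PySem.Chars.splitOn
    simpa using pvGoNoSep (cs.length + 1) cs [] [] h
  exact List.length_eq_one_iff.mp hlen

theorem pvLen6 {α : Type} (l : List α) (h : l.length = 6) :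
    ∃ a b c d e f, l = [a, b, c, d, e, f] := by
  rcases l with _ | ⟨a, _ | ⟨b, _ | ⟨c, _ | ⟨d, _ | ⟨e, _ | ⟨f, _ | ⟨g, t⟩⟩⟩⟩⟩⟩⟩ <;>
    first
      | exact ⟨_, _, _, _, _, _, rfl⟩
      | simp_all

theorem pvLen8 {α : Type} (l : List α) (h : l.length = 8) :
    ∃ a b c d e f g k, l = [a, b, c, d, e, f, g, k] := by
  rcases l with _ | ⟨a, _ | ⟨b, _ | ⟨c, _ | ⟨d, _ | ⟨e, _ | ⟨f, _ | ⟨g, _ | ⟨k, _ | ⟨m, t⟩⟩⟩⟩⟩⟩⟩⟩⟩ <;>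
    first
      | exact ⟨_, _, _, _, _, _, _, _, rfl⟩
      | simp_all

-- a successful loop run produces one value per field
theorem pvCollectGo_some_length (parse : List Char → Option Int) :
    ∀ (fields : List (List Char)) (v : List Int),
    pvCollectGo parse fields = some v → v.length = fields.length := by
  intro fields
  induction fields with
  | nil => intro v hv; simp [pvCollectGo] at hv; simp [← hv]
  | cons f rest ih =>
    intro v hv
    simp only [pvCollectGo] at hv
    cases hp : parse f with
    | none => rw [hp] at hv; cases hv
    | some x =>
      rw [hp] at hv
      cases hr : pvCollectGo parse rest with
      | none => rw [hr] at hv; cases hv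
      | some vs => rw [hr] at hv; simp at hv; simp [← hv, ih vs hr]

-- with the wrong number of fields B returns the default, parsed or not
theorem pvFinish_default (parse : List Char → Option Int) (fields : List (List Char))
    (h3 : fields.length ≠ 3) (h4 : fields.length ≠ 4) :
    pvFinish parse fields = (0, 0, 0, 0) := by
  unfold pvFinish
  cases h : pvCollectGo parse fields with
  | none => simp
  | some v =>
    have := pvCollectGo_some_length parse fields v h
    simp only [Option.getD_some]
    rw [if_neg (by omega)]

-- number of 2-char hex chunks B builds for a nonempty string
theorem pvChunks_length (cs : List Char) (hne : cs ≠ []) {β : Type} (f : Int → β) :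
    ((PySem.List.pyRange 0 (PySem.List.len cs) 2).map f).length = (cs.length + 1) / 2 := by
  have hlen : PySem.List.len cs = (cs.length : Int) := rfl
  have h0 : cs.length ≠ 0 := fun h => hne (List.eq_nil_of_length_eq_zero h)
  rw [PySem.List.pyRange_of_pos 0 (PySem.List.len cs) (by norm_num : (0:Int) < 2)]
  simp only [List.length_map, List.length_range]
  rw [if_pos (by rw [hlen]; omega)]
  rw [hlen]
  omega

-- A's comma-split pattern match agrees with B's loop-filter-pad form
theorem pvCommaEq (ps : List (List Char)) :
    (match ps.map (fun p => PySem.Int.ofChars? (PySem.Chars.strip p)) with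
     | [some r, some g, some b] => (r, g, b, (255 : Int))
     | [some r, some g, some b, some a] => (r, g, b, a)
     | _ => ((0 : Int), (0 : Int), (0 : Int), (0 : Int))) =
    pvFinish (fun t => PySem.Int.ofChars? t) (ps.map (fun p => PySem.Chars.strip p)) := by
  rcases ps with _ | ⟨a, _ | ⟨b, _ | ⟨c, _ | ⟨d, _ | ⟨e, t⟩⟩⟩⟩⟩ <;>
    simp only [List.map, pvFinish, pvCollectGo] <;>
    (try cases PySem.Int.ofChars? (PySem.Chars.strip a)) <;>
    (try cases PySem.Int.ofChars? (PySem.Chars.strip b)) <;>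
    (try cases PySem.Int.ofChars? (PySem.Chars.strip c)) <;>
    (try cases PySem.Int.ofChars? (PySem.Chars.strip d)) <;>
    (try cases PySem.Int.ofChars? (PySem.Chars.strip e)) <;>
    (try cases hrec : pvCollectGo (fun t => PySem.Int.ofChars? t) (t.map (fun p => PySem.Chars.strip p))) <;>
    rfl

-- ===== VERDICT (by name: the statement is the Claim_ definition above) =====
set_option maxHeartbeats 2000000 in
theorem parse_color_string_py_spec : Claim_equal_parse_color_string_py := by
  intro s hdom
  unfold Spec_parse_color_string_py parse_color_string_py parse_color_string_py_alt
  have hchar : ∀ c ∈ PySem.Chars.strip s.toList, c.toNat < 128 := by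
    intro c hc
    have hmem : c ∈ s.toList := (pvStrip_sublist s.toList).mem hc
    have := List.all_eq_true.mp hdom c hmem
    simp [pvDomChar] at this
    omega
  simp only []
  generalize hgen : PySem.Chars.strip s.toList = cs at hchar ⊢
  by_cases he : cs = []
  · subst he; decide
  · rw [if_neg he]
    by_cases hc : (',' ∈ cs)
    · rw [if_pos hc]
      by_cases h6 : cs.length = 6
      · obtain ⟨c0, c1, c2, c3, c4, c5, rfl⟩ := pvLen6 cs h6
        rw [show PySem.List.slice [c0,c1,c2,c3,c4,c5] (some 0) (some 2) = [c0,c1] from rfl,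
            show PySem.List.slice [c0,c1,c2,c3,c4,c5] (some 2) (some 4) = [c2,c3] from rfl,
            show PySem.List.slice [c0,c1,c2,c3,c4,c5] (some 4) (some 6) = [c4,c5] from rfl]
        cases ha : PySem.Int.ofCharsBase? [c0,c1] 16 <;>
          cases hb : PySem.Int.ofCharsBase? [c2,c3] 16 <;>
          cases hcp : PySem.Int.ofCharsBase? [c4,c5] 16 <;>
          try exact pvCommaEq _
        -- all-some: contradiction, a slice contains the comma
        simp only [List.mem_cons, List.not_mem_nil, or_false] at hc
        rcases hc with h | h | h | h | h | h <;> subst h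
        · rw [pvHexNoneLeft' c1 (hchar c1 (by simp))] at ha; cases ha
        · rw [pvHexNoneRight' c0 (hchar c0 (by simp))] at ha; cases ha
        · rw [pvHexNoneLeft' c3 (hchar c3 (by simp))] at hb; cases hb
        · rw [pvHexNoneRight' c2 (hchar c2 (by simp))] at hb; cases hb
        · rw [pvHexNoneLeft' c5 (hchar c5 (by simp))] at hcp; cases hcp
        · rw [pvHexNoneRight' c4 (hchar c4 (by simp))] at hcp; cases hcp
      · by_cases h8 : cs.length = 8
        · obtain ⟨c0, c1, c2, c3, c4, c5, c6, c7, rfl⟩ := pvLen8 cs h8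
          rw [show PySem.List.slice [c0,c1,c2,c3,c4,c5,c6,c7] (some 0) (some 2) = [c0,c1] from rfl,
              show PySem.List.slice [c0,c1,c2,c3,c4,c5,c6,c7] (some 2) (some 4) = [c2,c3] from rfl,
              show PySem.List.slice [c0,c1,c2,c3,c4,c5,c6,c7] (some 4) (some 6) = [c4,c5] from rfl,
              show PySem.List.slice [c0,c1,c2,c3,c4,c5,c6,c7] (some 6) (some 8) = [c6,c7] from rfl]
          cases ha : PySem.Int.ofCharsBase? [c0,c1] 16 <;>
            cases hb : PySem.Int.ofCharsBase? [c2,c3] 16 <;>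
            cases hcp : PySem.Int.ofCharsBase? [c4,c5] 16 <;>
            cases hd : PySem.Int.ofCharsBase? [c6,c7] 16 <;>
            try exact pvCommaEq _
          simp only [List.mem_cons, List.not_mem_nil, or_false] at hc
          rcases hc with h | h | h | h | h | h | h | h <;> subst h
          · rw [pvHexNoneLeft' c1 (hchar c1 (by simp))] at ha; cases ha
          · rw [pvHexNoneRight' c0 (hchar c0 (by simp))] at ha; cases ha
          · rw [pvHexNoneLeft' c3 (hchar c3 (by simp))] at hb; cases hb
          · rw [pvHexNoneRight' c2 (hchar c2 (by simp))] at hb; cases hb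
          · rw [pvHexNoneLeft' c5 (hchar c5 (by simp))] at hcp; cases hcp
          · rw [pvHexNoneRight' c4 (hchar c4 (by simp))] at hcp; cases hcp
          · rw [pvHexNoneLeft' c7 (hchar c7 (by simp))] at hd; cases hd
          · rw [pvHexNoneRight' c6 (hchar c6 (by simp))] at hd; cases hd
        · rw [if_neg h6, if_neg h8]
          exact pvCommaEq _
    · rw [if_neg hc]
      obtain ⟨w, hw⟩ := pvSplitOn_no_comma cs hc
      by_cases h6 : cs.length = 6
      · obtain ⟨c0, c1, c2, c3, c4, c5, rfl⟩ := pvLen6 cs h6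
        rw [show PySem.List.len [c0,c1,c2,c3,c4,c5] = (6:Int) from rfl,
            if_pos (show PySem.Int.mod (6:Int) 2 = 0 by decide),
            show PySem.List.pyRange 0 (6:Int) 2 = [0, 2, 4] from by decide, hw]
        simp only [List.map, pvFinish, pvCollectGo]
        rw [show PySem.List.slice [c0,c1,c2,c3,c4,c5] (some 0) (some (0 + 2)) = [c0,c1] from rfl,
            show PySem.List.slice [c0,c1,c2,c3,c4,c5] (some 2) (some (2 + 2)) = [c2,c3] from rfl,
            show PySem.List.slice [c0,c1,c2,c3,c4,c5] (some 4) (some (4 + 2)) = [c4,c5] from rfl,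
            show PySem.List.slice [c0,c1,c2,c3,c4,c5] (some 0) (some 2) = [c0,c1] from rfl,
            show PySem.List.slice [c0,c1,c2,c3,c4,c5] (some 2) (some 4) = [c2,c3] from rfl,
            show PySem.List.slice [c0,c1,c2,c3,c4,c5] (some 4) (some 6) = [c4,c5] from rfl]
        cases ha : PySem.Int.ofCharsBase? [c0,c1] 16 <;>
          cases hb : PySem.Int.ofCharsBase? [c2,c3] 16 <;>
          cases hcp : PySem.Int.ofCharsBase? [c4,c5] 16 <;>
          cases hww : PySem.Int.ofChars? (PySem.Chars.strip w) <;>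
          rfl
      · by_cases h8 : cs.length = 8
        · obtain ⟨c0, c1, c2, c3, c4, c5, c6, c7, rfl⟩ := pvLen8 cs h8
          rw [show PySem.List.len [c0,c1,c2,c3,c4,c5,c6,c7] = (8:Int) from rfl,
              if_pos (show PySem.Int.mod (8:Int) 2 = 0 by decide),
              show PySem.List.pyRange 0 (8:Int) 2 = [0, 2, 4, 6] from by decide, hw]
          simp only [List.map, pvFinish, pvCollectGo]
          rw [show PySem.List.slice [c0,c1,c2,c3,c4,c5,c6,c7] (some 0) (some (0 + 2)) = [c0,c1] from rfl,
              show PySem.List.slice [c0,c1,c2,c3,c4,c5,c6,c7] (some 2) (some (2 + 2)) = [c2,c3] from rfl,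
              show PySem.List.slice [c0,c1,c2,c3,c4,c5,c6,c7] (some 4) (some (4 + 2)) = [c4,c5] from rfl,
              show PySem.List.slice [c0,c1,c2,c3,c4,c5,c6,c7] (some 6) (some (6 + 2)) = [c6,c7] from rfl,
              show PySem.List.slice [c0,c1,c2,c3,c4,c5,c6,c7] (some 0) (some 2) = [c0,c1] from rfl,
              show PySem.List.slice [c0,c1,c2,c3,c4,c5,c6,c7] (some 2) (some 4) = [c2,c3] from rfl,
              show PySem.List.slice [c0,c1,c2,c3,c4,c5,c6,c7] (some 4) (some 6) = [c4,c5] from rfl,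
              show PySem.List.slice [c0,c1,c2,c3,c4,c5,c6,c7] (some 6) (some 8) = [c6,c7] from rfl]
          cases ha : PySem.Int.ofCharsBase? [c0,c1] 16 <;>
            cases hb : PySem.Int.ofCharsBase? [c2,c3] 16 <;>
            cases hcp : PySem.Int.ofCharsBase? [c4,c5] 16 <;>
            cases hd : PySem.Int.ofCharsBase? [c6,c7] 16 <;>
            cases hww : PySem.Int.ofChars? (PySem.Chars.strip w) <;>
            rfl
        · -- neither 6 nor 8: A's comma fallback sees one field; B's filter rejects
          rw [if_neg h6, if_neg h8, hw]
          have hA : (match [PySem.Int.ofChars? (PySem.Chars.strip w)] with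
              | [some r, some g, some b] => (r, g, b, (255 : Int))
              | [some r, some g, some b, some a] => (r, g, b, a)
              | _ => ((0:Int), (0:Int), (0:Int), (0:Int))) = ((0:Int), (0:Int), (0:Int), (0:Int)) := by
            cases PySem.Int.ofChars? (PySem.Chars.strip w) <;> rfl
          simp only [List.map] at hA ⊢
          rw [hA]
          by_cases heven : PySem.Int.mod (PySem.List.len cs) 2 = 0
          · rw [if_pos heven]
            have hdvd : (2:Int) ∣ (cs.length : Int) :=
              (PySem.Int.mod_eq_zero_iff_dvd (PySem.List.len cs) 2).mp heven
            have hdvd' : 2 ∣ cs.length := by exact_mod_cast hdvd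
            rw [pvFinish_default _ _ (by rw [pvChunks_length cs he]; omega)
                (by rw [pvChunks_length cs he]; omega)]
          · rw [if_neg heven]
            rw [pvFinish_default _ [] (by simp) (by simp)]
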